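-- pv_equiv track=rewrite | github.com/n4hy/PassiveRadar_Kraken | layout_grc.py | parse_yaml_blocks
-- ===== SOURCE A (Python) =====
-- def parse_yaml_blocks(lines):
--     blocks = []
--     current_block = []
--     in_block = False
--
--     for line in lines:
--         if line.strip().startswith('- name:'):
--             if current_block:
--                 blocks.append(current_block)
--             current_block = [line]
--             in_block = True
--         elif in_block:
--             if line.strip().startswith('connections:') or line.strip().startswith('metadata:'):
--                 in_block = False
--                 blocks.append(current_block)
--                 current_block = []
--             else:
--                 current_block.append(line)
--         else:
--             pass
--
--     if current_block:
--         blocks.append(current_block)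
--
--     return blocks
-- ===== SOURCE B (Python) =====
-- def parse_yaml_blocks(lines):
--     # Segment-splitting rewrite: no in_block flag, no trailing flush.
--     # At each '- name:' line, an inner scan finds the end of the block body,
--     # the whole block is sliced out at once, and the cursor jumps past it.
--     def is_name(l):
--         return l.strip().startswith('- name:')
--
--     def is_body(l):
--         s = l.strip()
--         return not (s.startswith('- name:') or s.startswith('connections:')
--                     or s.startswith('metadata:'))
--
--     blocks = []
--     n = len(lines)
--     i = 0
--     while i < n:
--         if is_name(lines[i]):
--             j = i + 1
--             while j < n and is_body(lines[j]):
--                 j += 1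
--             blocks.append(lines[i:j])
--             i = j
--         else:
--             i += 1
--     return blocks
-- ===== Notes on version B (the rewrite author's own statement) =====
-- stated objective: alternative
-- what changed: Replaces A's flag-driven state machine (in_block flag, growing current_block, trailing flush) with a segment-splitting loop: at each '- name:' line an inner scan measures the block body, the whole block is sliced out at once, and the loop jumps past it; no flag and no final flush.
import Mathlib
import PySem

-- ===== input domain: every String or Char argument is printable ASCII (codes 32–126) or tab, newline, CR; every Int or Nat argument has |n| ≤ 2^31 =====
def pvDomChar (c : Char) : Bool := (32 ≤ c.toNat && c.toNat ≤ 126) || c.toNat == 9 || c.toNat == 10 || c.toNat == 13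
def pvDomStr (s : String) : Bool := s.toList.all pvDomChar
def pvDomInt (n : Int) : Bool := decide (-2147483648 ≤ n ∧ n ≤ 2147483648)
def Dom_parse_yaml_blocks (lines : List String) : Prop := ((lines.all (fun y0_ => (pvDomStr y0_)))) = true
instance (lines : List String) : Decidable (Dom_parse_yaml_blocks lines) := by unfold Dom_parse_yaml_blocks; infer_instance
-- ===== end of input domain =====

-- B replaces A's in_block flag machine by a segment-splitting loop (alternative decomposition, same cost).

-- ===== PORT A =====
-- the for-loop over lines, carrying (blocks, current_block, in_block) exactly as A does
def pvALoop : List String → List (List String) → List String → Bool → List (List String) × List String × Bool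
  | [], blocks, current, inb => (blocks, current, inb)
  | line :: ls, blocks, current, inb =>
    if PySem.Str.startswith (PySem.Str.strip line) "- name:" then
      pvALoop ls (if current.isEmpty then blocks else blocks ++ [current]) [line] true
    else if inb then
      if PySem.Str.startswith (PySem.Str.strip line) "connections:"
          || PySem.Str.startswith (PySem.Str.strip line) "metadata:" then
        pvALoop ls (blocks ++ [current]) [] false
      else
        pvALoop ls blocks (current ++ [line]) inb
    else
      pvALoop ls blocks current inb

def parse_yaml_blocks (lines : List String) : List (List String) :=
  let r := pvALoop lines [] [] false
  if r.2.1.isEmpty then r.1 else r.1 ++ [r.2.1]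

-- ===== PORT B =====
def pvIsName (l : String) : Bool := PySem.Str.startswith (PySem.Str.strip l) "- name:"

def pvIsBody (l : String) : Bool :=
  !(PySem.Str.startswith (PySem.Str.strip l) "- name:"
    || PySem.Str.startswith (PySem.Str.strip l) "connections:"
    || PySem.Str.startswith (PySem.Str.strip l) "metadata:")

-- Source B's inner while: count how many leading lines are body lines
def pvBodyLen : List String → Nat
  | [] => 0
  | l :: ls => if pvIsBody l then pvBodyLen ls + 1 else 0

-- Source B's outer while over `rest`; the slices rest[0:i] / rest[i:] (0 ≤ i ≤ len) are take/drop
def parse_yaml_blocks_alt : List String → List (List String)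
  | [] => []
  | l :: ls =>
    if pvIsName l then
      let n := pvBodyLen ls
      (l :: ls.take n) :: parse_yaml_blocks_alt (ls.drop n)
    else
      parse_yaml_blocks_alt ls
termination_by ls => ls.length
decreasing_by
  · simpa using Nat.lt_succ_of_le (List.length_drop_le ..)
  · simp

-- ===== PRECONDITION & SPEC =====
def Spec_parse_yaml_blocks (lines : List String) (out : List (List String)) : Prop := out = parse_yaml_blocks_alt lines
instance (lines : List String) (out : List (List String)) : Decidable (Spec_parse_yaml_blocks lines out) := by unfold Spec_parse_yaml_blocks; infer_instance

-- ===== CLAIM (what is proved, stated in full; the proofs are below) =====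
def Claim_equal_parse_yaml_blocks : Prop := ∀ (lines : List String), Dom_parse_yaml_blocks lines → Spec_parse_yaml_blocks lines (parse_yaml_blocks lines)

-- ===== LEMMAS AND PROOFS =====

-- finalization step of A (the trailing `if current_block:` flush)
def pvFin (r : List (List String) × List String × Bool) : List (List String) :=
  if r.2.1.isEmpty then r.1 else r.1 ++ [r.2.1]

theorem pvALoop_spec (rest : List String) :
    (∀ blocks cur, cur ≠ [] →
      pvFin (pvALoop rest blocks cur true)
        = blocks ++ (cur ++ rest.take (pvBodyLen rest)) :: parse_yaml_blocks_alt (rest.drop (pvBodyLen rest)))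
    ∧ (∀ blocks, pvFin (pvALoop rest blocks [] false) = blocks ++ parse_yaml_blocks_alt rest) := by
  induction rest with
  | nil =>
    constructor
    · intro blocks cur hcur
      simp only [pvALoop, pvBodyLen, pvFin, parse_yaml_blocks_alt, List.take_nil, List.drop_nil]
      simp [hcur]
    · intro blocks
      simp [pvALoop, pvFin, parse_yaml_blocks_alt]
  | cons l ls ih =>
    obtain ⟨ih1, ih2⟩ := ih
    by_cases hn : PySem.Str.startswith (PySem.Str.strip l) "- name:" = true
    · -- the '- name:' branch
      have hnm : pvIsName l = true := hn
      have hb : pvIsBody l = false := by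
        simp only [pvIsBody, hn, Bool.true_or, Bool.not_true]
      constructor
      · intro blocks cur hcur
        rw [pvALoop, if_pos hn, ih1 _ [l] (by simp)]
        have : cur.isEmpty = false := by simp [hcur]
        rw [this]
        simp only [pvBodyLen, hb, Bool.false_eq_true, if_false, List.take_zero, List.drop_zero,
          parse_yaml_blocks_alt, hnm, if_pos]
        simp
      · intro blocks
        rw [pvALoop, if_pos hn, ih1 _ [l] (by simp)]
        simp only [List.isEmpty_nil, if_pos, parse_yaml_blocks_alt, hnm]
        simp [pvBodyLen, hb]
    · rw [Bool.not_eq_true] at hn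
      have hnm : pvIsName l = false := hn
      by_cases hc : (PySem.Str.startswith (PySem.Str.strip l) "connections:"
          || PySem.Str.startswith (PySem.Str.strip l) "metadata:") = true
      · -- the close ('connections:'/'metadata:') branch
        have hb : pvIsBody l = false := by
          simp only [pvIsBody, hn, Bool.false_or, hc, Bool.not_true]
        constructor
        · intro blocks cur hcur
          rw [pvALoop]
          simp only [hn, Bool.false_eq_true, if_false, if_pos, hc, if_true]
          rw [ih2]
          simp only [pvBodyLen, hb, Bool.false_eq_true, if_false, List.take_zero, List.drop_zero,
            parse_yaml_blocks_alt, hnm]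
          simp
        · intro blocks
          rw [pvALoop]
          simp only [hn, Bool.false_eq_true, if_false]
          rw [ih2, parse_yaml_blocks_alt]
          simp only [hnm, Bool.false_eq_true, if_false]
      · -- body line
        rw [Bool.not_eq_true] at hc
        have hb : pvIsBody l = true := by
          simp only [pvIsBody, hn, Bool.false_or, hc, Bool.not_false]
        constructor
        · intro blocks cur hcur
          rw [pvALoop]
          simp only [hn, Bool.false_eq_true, if_false, hc, if_true]
          rw [ih1 _ (cur ++ [l]) (by simp)]
          simp only [pvBodyLen, hb, if_true, List.take_succ_cons, List.drop_succ_cons]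
          simp
        · intro blocks
          rw [pvALoop]
          simp only [hn, hc, Bool.false_eq_true, if_false]
          rw [ih2, parse_yaml_blocks_alt]
          simp only [hnm, Bool.false_eq_true, if_false]

-- ===== VERDICT (by name: the statement is the Claim_ definition above) =====
theorem parse_yaml_blocks_spec : Claim_equal_parse_yaml_blocks := by
  intro lines _
  unfold Spec_parse_yaml_blocks parse_yaml_blocks
  have h := (pvALoop_spec lines).2 []
  simp only [pvFin] at h
  simpa using h
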